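-- pv_equiv track=rewrite | github.com/PrimaryFantasty/Fantasty | K-Means/cluster1.py | everyarticle_s_range
-- ===== SOURCE A (Python) =====
-- def everyarticle_s_range(everyarticle_s):
--     tokens = {}
--     for k, tw in everyarticle_s.items():
--         for t, w in tw.items():
--             if t not in tokens:
--                 tokens[t] = []
--             tokens[t].append(w)
--     res = {}
--     for t, wl in tokens.items():
--         res[t] = (min(wl), max(wl))
--     return res
-- ===== SOURCE B (Python) =====
-- def everyarticle_s_range(everyarticle_s):
--     res = {}
--     for tw in everyarticle_s.values():
--         for t, w in tw.items():
--             cur = res.get(t)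
--             if cur is None:
--                 res[t] = (w, w)
--             else:
--                 res[t] = (min(cur[0], w), max(cur[1], w))
--     return res
-- ===== Notes on version B (the rewrite author's own statement) =====
-- stated objective: simpler
-- what changed: B computes the per-token (min,max) in a single pass that maintains a running pair per token, eliminating A's intermediate per-token weight lists and its second reduction loop over them.
import Mathlib
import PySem

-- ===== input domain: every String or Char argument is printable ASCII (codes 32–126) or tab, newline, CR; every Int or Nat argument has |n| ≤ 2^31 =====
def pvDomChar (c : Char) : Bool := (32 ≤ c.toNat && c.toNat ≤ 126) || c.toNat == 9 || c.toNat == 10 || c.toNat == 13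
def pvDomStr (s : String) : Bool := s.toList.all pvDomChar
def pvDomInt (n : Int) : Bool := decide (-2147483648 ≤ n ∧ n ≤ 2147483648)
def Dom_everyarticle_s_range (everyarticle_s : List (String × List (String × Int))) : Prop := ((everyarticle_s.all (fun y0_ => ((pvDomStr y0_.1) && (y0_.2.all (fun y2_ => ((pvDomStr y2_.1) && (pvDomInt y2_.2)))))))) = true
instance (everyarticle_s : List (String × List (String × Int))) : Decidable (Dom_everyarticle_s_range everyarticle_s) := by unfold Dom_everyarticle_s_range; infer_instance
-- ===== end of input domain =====

-- B does the same job in ONE pass keeping a running (min,max) per token, instead of A's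
-- two passes (collect every weight per token into a list, then reduce each list): simpler.
-- Both ports first marshal the association-list argument into the dict-of-dicts the Python
-- functions receive (duplicate keys: last value wins, first position kept), as dict() does.

-- ===== PORT A =====
-- min(wl)/max(wl): PySem.List.min?/max? return none only on wl = [], which A never reaches
-- (every list in `tokens` has been appended to); `.getD 0` is that unreachable arm.
def pvMM (wl : List Int) : Int × Int :=
  ((PySem.List.min? wl (fun y => y)).getD 0, (PySem.List.max? wl (fun y => y)).getD 0)

def pvStepA (tokens : PySem.Dict String (List Int)) (p : String × Int) :
    PySem.Dict String (List Int) :=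
  let tokens := if tokens.contains p.1 then tokens else tokens.insert p.1 ([] : List Int)
  tokens.modify p.1 [] (fun wl => wl ++ [p.2])

def everyarticle_s_range (everyarticle_s : List (String × List (String × Int))) : List (String × Int × Int) :=
  let d : PySem.Dict String (PySem.Dict String Int) :=
    PySem.Dict.ofList (everyarticle_s.map (fun p => (p.1, PySem.Dict.ofList p.2)))
  let tokens : PySem.Dict String (List Int) :=
    d.items.foldl (fun tokens kt => kt.2.items.foldl pvStepA tokens) PySem.Dict.empty
  let res : PySem.Dict String (Int × Int) :=
    tokens.items.foldl (fun res q => res.insert q.1 (pvMM q.2)) PySem.Dict.empty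
  res.items

-- ===== PORT B =====
def pvStepB (res : PySem.Dict String (Int × Int)) (p : String × Int) :
    PySem.Dict String (Int × Int) :=
  match res.get? p.1 with
  | none => res.insert p.1 (p.2, p.2)
  | some c => res.insert p.1 (min c.1 p.2, max c.2 p.2)

def everyarticle_s_range_alt (everyarticle_s : List (String × List (String × Int))) : List (String × Int × Int) :=
  let d : PySem.Dict String (PySem.Dict String Int) :=
    PySem.Dict.ofList (everyarticle_s.map (fun p => (p.1, PySem.Dict.ofList p.2)))
  let res : PySem.Dict String (Int × Int) :=
    d.values.foldl (fun res tw => tw.items.foldl pvStepB res) PySem.Dict.empty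
  res.items

-- ===== PRECONDITION & SPEC =====
def Spec_everyarticle_s_range (everyarticle_s : List (String × List (String × Int))) (out : List (String × Int × Int)) : Prop := out = everyarticle_s_range_alt everyarticle_s
instance (everyarticle_s : List (String × List (String × Int))) (out : List (String × Int × Int)) : Decidable (Spec_everyarticle_s_range everyarticle_s out) := by unfold Spec_everyarticle_s_range; infer_instance

-- ===== CLAIM (what is proved, stated in full; the proofs are below) =====
def Claim_equal_everyarticle_s_range : Prop := ∀ (everyarticle_s : List (String × List (String × Int))), Dom_everyarticle_s_range everyarticle_s → Spec_everyarticle_s_range everyarticle_s (everyarticle_s_range everyarticle_s)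

-- ===== LEMMAS AND PROOFS =====

-- The invariant tying A's per-token list dict to B's running (min,max) dict.
def pvInv (tokens : PySem.Dict String (List Int)) (res : PySem.Dict String (Int × Int)) : Prop :=
  tokens.keys.Nodup ∧
  res.items = tokens.items.map (fun q => (q.1, pvMM q.2)) ∧
  ∀ q ∈ tokens.items, q.2 ≠ []

theorem pvMM_append (x : Int) (rest : List Int) (w : Int) :
    pvMM ((x :: rest) ++ [w]) = (min (pvMM (x :: rest)).1 w, max (pvMM (x :: rest)).2 w) := by
  simp [pvMM, PySem.List.min?_id_cons, PySem.List.max?_id_cons, List.foldl_append]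

theorem pvInv_keys_eq (tokens : PySem.Dict String (List Int)) (res : PySem.Dict String (Int × Int))
    (h : pvInv tokens res) : res.keys = tokens.keys := by
  obtain ⟨-, hit, -⟩ := h
  simp [PySem.Dict.keys, hit]

theorem pvInv_step (tokens : PySem.Dict String (List Int)) (res : PySem.Dict String (Int × Int))
    (p : String × Int) (h : pvInv tokens res) : pvInv (pvStepA tokens p) (pvStepB res p) := by
  obtain ⟨hnd, hit, hne⟩ := h
  have hkeys : res.keys = tokens.keys := pvInv_keys_eq _ _ ⟨hnd, hit, hne⟩
  by_cases hc : tokens.contains p.1 = true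
  · -- token already present: both sides overwrite in place
    have hmem : p.1 ∈ tokens.keys := (PySem.Dict.contains_iff_mem_keys _ _).mp hc
    obtain ⟨wl, hwl⟩ : ∃ wl, tokens.get? p.1 = some wl := by
      rcases hg : tokens.get? p.1 with _ | wl
      · exact absurd ((PySem.Dict.get?_eq_none_iff_not_mem_keys _ _).mp hg) (by simpa using hmem)
      · exact ⟨wl, rfl⟩
    have hitem : (p.1, wl) ∈ tokens.items := PySem.Dict.mem_items_of_get?_eq_some _ hwl
    have hwlne : wl ≠ [] := hne _ hitem
    have hrnd : res.keys.Nodup := hkeys ▸ hnd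
    have hres : res.get? p.1 = some (pvMM wl) := by
      refine PySem.Dict.get?_of_mem_items _ ?_ hrnd
      rw [hit]
      exact List.mem_map.mpr ⟨(p.1, wl), hitem, rfl⟩
    have hrc : res.contains p.1 = true :=
      (PySem.Dict.contains_iff_mem_keys _ _).mpr (hkeys ▸ hmem)
    have hgd : tokens.getD p.1 [] = wl := by
      rw [PySem.Dict.getD_eq_get?_getD, hwl]; rfl
    have hA : pvStepA tokens p = tokens.insert p.1 (wl ++ [p.2]) := by
      simp [pvStepA, hc, PySem.Dict.modify, hgd]
    have hB : pvStepB res p = res.insert p.1 (min (pvMM wl).1 p.2, max (pvMM wl).2 p.2) := by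
      simp [pvStepB, hres]
    rw [hA, hB]
    refine ⟨PySem.Dict.nodup_keys_insert _ _ _ hnd, ?_, ?_⟩
    · rw [PySem.Dict.items_insert_of_contains _ _ hc,
        PySem.Dict.items_insert_of_contains _ _ hrc, hit, List.map_map, List.map_map]
      refine List.map_congr_left (fun q hq => ?_)
      by_cases h1 : q.1 = p.1
      · have hq2 : q.2 = wl := by
          have := PySem.Dict.get?_of_mem_items _ (h1 ▸ hq : (p.1, q.2) ∈ tokens.items) hnd
          rw [hwl] at this; exact (Option.some.injEq _ _).mp this.symm
        obtain ⟨x, rest, rfl⟩ : ∃ x rest, wl = x :: rest := by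
          rcases wl with _ | ⟨x, rest⟩
          · exact absurd rfl hwlne
          · exact ⟨x, rest, rfl⟩
        simp [h1]
        exact (pvMM_append x rest p.2).symm
      · simp [h1]
    · intro q hq
      rcases (PySem.Dict.mem_items_insert _ _ _ _).mp hq with rfl | ⟨hq', -⟩
      · simp
      · exact hne _ hq'
  · -- fresh token: both sides append a new entry
    have hc' : tokens.contains p.1 = false := by simpa using hc
    have hmem : p.1 ∉ tokens.keys := fun h => hc ((PySem.Dict.contains_iff_mem_keys _ _).mpr h)
    have hrc : res.contains p.1 = false := by
      rcases hb : res.contains p.1 with _ | _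
      · rfl
      · exact absurd ((PySem.Dict.contains_iff_mem_keys _ _).mp hb) (hkeys ▸ hmem)
    have hres : res.get? p.1 = none :=
      (PySem.Dict.get?_eq_none_iff_not_mem_keys _ _).mpr (hkeys ▸ hmem)
    have hA : pvStepA tokens p = tokens.insert p.1 [p.2] := by
      simp [pvStepA, hc', PySem.Dict.modify, PySem.Dict.getD_insert_self,
        PySem.Dict.insert_insert_self]
    have hB : pvStepB res p = res.insert p.1 (p.2, p.2) := by
      simp [pvStepB, hres]
    rw [hA, hB]
    refine ⟨PySem.Dict.nodup_keys_insert _ _ _ hnd, ?_, ?_⟩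
    · rw [PySem.Dict.items_insert_of_not_contains _ _ hc',
        PySem.Dict.items_insert_of_not_contains _ _ hrc, hit, List.map_append]
      simp [pvMM, PySem.List.min?_id_cons, PySem.List.max?_id_cons]
    · intro q hq
      rcases (PySem.Dict.mem_items_insert _ _ _ _).mp hq with rfl | ⟨hq', -⟩
      · simp
      · exact hne _ hq'

theorem pvInv_foldl (L : List (String × Int)) (tokens : PySem.Dict String (List Int))
    (res : PySem.Dict String (Int × Int)) (h : pvInv tokens res) :
    pvInv (L.foldl pvStepA tokens) (L.foldl pvStepB res) := by
  induction L generalizing tokens res with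
  | nil => exact h
  | cons p L ih => exact ih _ _ (pvInv_step _ _ _ h)

theorem pvInv_foldl_nested (L : List (String × PySem.Dict String Int))
    (tokens : PySem.Dict String (List Int)) (res : PySem.Dict String (Int × Int))
    (h : pvInv tokens res) :
    pvInv (L.foldl (fun t kt => kt.2.items.foldl pvStepA t) tokens)
          (L.foldl (fun r kt => kt.2.items.foldl pvStepB r) res) := by
  induction L generalizing tokens res with
  | nil => exact h
  | cons kt L ih => exact ih _ _ (pvInv_foldl _ _ _ h)

-- ===== VERDICT (by name: the statement is the Claim_ definition above) =====
theorem everyarticle_s_range_spec : Claim_equal_everyarticle_s_range := by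
  intro xs _
  unfold Spec_everyarticle_s_range everyarticle_s_range everyarticle_s_range_alt
  simp only [PySem.Dict.values, List.foldl_map]
  set d := PySem.Dict.ofList (xs.map (fun p => (p.1, PySem.Dict.ofList p.2))) with hd
  have hinv : pvInv (d.items.foldl (fun t kt => kt.2.items.foldl pvStepA t) PySem.Dict.empty)
      (d.items.foldl (fun r kt => kt.2.items.foldl pvStepB r) PySem.Dict.empty) := by
    refine pvInv_foldl_nested _ _ _ ?_
    refine ⟨?_, ?_, ?_⟩ <;> simp [PySem.Dict.keys, PySem.Dict.empty]
  set tokens := d.items.foldl (fun t kt => kt.2.items.foldl pvStepA t) PySem.Dict.empty with ht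
  obtain ⟨hnd, hit, -⟩ := hinv
  rw [hit]
  refine PySem.Dict.items_foldl_insert_fresh tokens.items (fun q => q.1) (fun q => pvMM q.2)
      PySem.Dict.empty (fun a _ => by simp [PySem.Dict.contains, PySem.Dict.empty]) ?_ |>.trans ?_
  · exact hnd
  · simp [PySem.Dict.empty]
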